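-- pv_equiv track=rewrite | github.com/Riadz/flood_forcasting | archive/genetical_clustering__.py | get_set
-- ===== SOURCE A (Python) =====
-- import math
--
-- def get_set(i, n, k):
--
--   c = []
--   r = i+0
--   j = 0
--   for s in range(1, k+1):
--     cs = j+1
--     while True:
--       _c = get_comb(n-cs, k-s)
--       if not ((r - _c) > 0):
--         break
--
--       r -= _c
--       cs += 1
--     c.append(cs)
--     j = cs
--   return c
--
-- def get_comb(n, r):
--   if (r <= n):
--     return (math.factorial(n) // (math.factorial(r) * math.factorial(n - r)))
--   else:
--     return 0
-- ===== SOURCE B (Python) =====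
-- import math
--
-- def get_set(i, n, k):
--   res = []
--   r = i
--   j = 0
--   for t in range(k, 0, -1):   # t = slots still to fill (including this one)
--     total = _comb(n - j, t)   # combos whose next element is > j
--     lo = j + 1
--     hi = n - t + 1            # largest feasible value for this position
--     if hi < lo:
--       hi = lo
--     # binary search: smallest c with r <= total - C(n-c, t)
--     # (total - C(n-c, t) = number of combos whose next element is in (j, c], by hockey-stick)
--     while lo < hi:
--       mid = (lo + hi) // 2
--       if r <= total - _comb(n - mid, t):
--         hi = mid
--       else:
--         lo = mid + 1
--     res.append(lo)
--     r -= total - _comb(n - lo + 1, t)   # drop combos whose element here is < lo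
--     j = lo
--   return res
--
-- def _comb(m, t):
--   if t < 0 or m < t:
--     return 0
--   return math.comb(m, t)
-- ===== Notes on version B (the rewrite author's own statement) =====
-- stated objective: alternative
-- what changed: B replaces A's per-candidate linear scan with factorial-based binomial recomputation by, for each of the k positions, a closed-form prefix count (hockey-stick identity: combos with element <= c equal C(n-j,t)-C(n-c,t)) and a binary search over the element value, so no candidate-by-candidate subtraction loop remains; it trades A's scan for O(log n) binomial evaluations per position.
import Mathlib
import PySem

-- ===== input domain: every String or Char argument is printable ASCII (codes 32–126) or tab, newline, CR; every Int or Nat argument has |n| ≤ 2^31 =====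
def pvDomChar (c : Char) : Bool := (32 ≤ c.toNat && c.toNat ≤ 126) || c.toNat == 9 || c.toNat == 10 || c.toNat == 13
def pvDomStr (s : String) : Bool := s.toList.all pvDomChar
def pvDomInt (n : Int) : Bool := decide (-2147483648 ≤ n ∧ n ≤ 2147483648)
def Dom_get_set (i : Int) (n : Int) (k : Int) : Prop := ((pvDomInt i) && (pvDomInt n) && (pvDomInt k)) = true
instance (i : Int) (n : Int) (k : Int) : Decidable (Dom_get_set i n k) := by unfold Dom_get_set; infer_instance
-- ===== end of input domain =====

-- B replaces A's per-candidate factorial-binomial scan by, per position, a closed-form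
-- prefix count (hockey-stick) plus a binary search over the element value (alternative algorithm).


-- ===== PORT A =====
-- get_comb: exact for the arguments get_set supplies (r = k-s ≥ 0; the taken branch forces 0 ≤ n,
-- so Nat factorial/division equal Python's math.factorial and //).
def getComb (n r : Int) : Int :=
  if r ≤ n then ((n.toNat.factorial / (r.toNat.factorial * (n - r).toNat.factorial) : Nat) : Int)
  else 0

-- A's inner 'while True' loop; fuel bounds the iterations (sufficient under Pre_, proved below).
def innerA (fuel : Nat) (n k s r cs : Int) : Int × Int :=
  match fuel with
  | 0 => (r, cs)
  | f + 1 =>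
    let _c := getComb (n - cs) (k - s)
    if ¬(r - _c > 0) then (r, cs)
    else innerA f n k s (r - _c) (cs + 1)

-- A's 'for s in range(1, k+1)' loop with state (c, r, j).
def outerA (slots : Nat) (n k s r j : Int) (c : List Int) : List Int :=
  match slots with
  | 0 => c
  | t + 1 =>
    let p := innerA (n.toNat + 2) n k s r (j + 1)
    outerA t n k (s + 1) p.1 p.2 (c ++ [p.2])

def get_set (i : Int) (n : Int) (k : Int) : List Int :=
  outerA k.toNat n k 1 i 0 []

-- ===== PORT B =====
-- _comb of Source B; math.comb on its non-raising domain is Nat.choose.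
def combB (m t : Int) : Int :=
  if t < 0 ∨ m < t then 0 else ((m.toNat.choose t.toNat : Nat) : Int)

-- Source B's 'while lo < hi' binary search; fuel bounds the iterations (sufficient, proved below).
def bsearchB (fuel : Nat) (r total n t lo hi : Int) : Int :=
  match fuel with
  | 0 => lo
  | f + 1 =>
    if lo < hi then
      let mid := PySem.Int.floordiv (lo + hi) 2
      if r ≤ total - combB (n - mid) t then bsearchB f r total n t lo mid
      else bsearchB f r total n t (mid + 1) hi
    else lo

-- Source B's 'for t in range(k, 0, -1)' loop with state (res, r, j).
def outerB (slots : Nat) (n t r j : Int) (res : List Int) : List Int :=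
  match slots with
  | 0 => res
  | u + 1 =>
    let total := combB (n - j) t
    let lo := j + 1
    let hi0 := n - t + 1
    let hi := if hi0 < lo then lo else hi0
    let c := bsearchB ((hi - lo).toNat + 1) r total n t lo hi
    outerB u n (t - 1) (r - (total - combB (n - c + 1) t)) c (res ++ [c])

def get_set_alt (i : Int) (n : Int) (k : Int) : List Int :=
  outerB k.toNat n k i 0 []

-- ===== PRECONDITION & SPEC =====
-- spec-side binomial coefficient (used only by Pre_ and the proofs, by neither port)
def binom (m t : Int) : Int :=
  if 0 ≤ t ∧ t ≤ m then ((m.toNat.choose t.toNat : Nat) : Int) else 0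

-- Pre_ excludes exactly the inputs where A never returns: for k ≥ 1 and i > C(n,k)
-- A's inner 'while True' loop eventually has _c = 0 with r > 0 and loops forever.
def Pre_get_set (i : Int) (n : Int) (k : Int) : Prop := k ≤ 0 ∨ i ≤ binom n k
instance (i : Int) (n : Int) (k : Int) : Decidable (Pre_get_set i n k) := by
  unfold Pre_get_set; infer_instance

def pvWitness_get_set : Int × Int × Int := (3, 5, 2)

def Spec_get_set (i : Int) (n : Int) (k : Int) (out : List Int) : Prop := out = get_set_alt i n k
instance (i : Int) (n : Int) (k : Int) (out : List Int) : Decidable (Spec_get_set i n k out) := by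
  unfold Spec_get_set; infer_instance

-- ===== CLAIM (what is proved, stated in full; the proofs are below) =====
def Claim_equal_get_set : Prop :=
  ∀ (i : Int) (n : Int) (k : Int), Dom_get_set i n k → Pre_get_set i n k →
    Spec_get_set i n k (get_set i n k)

-- ===== LEMMAS AND PROOFS =====

lemma binom_nonneg (m t : Int) : 0 ≤ binom m t := by
  unfold binom; split
  · exact Int.natCast_nonneg _
  · exact le_refl 0

lemma combB_eq (m t : Int) : combB m t = binom m t := by
  unfold combB binom
  by_cases h : t < 0 ∨ m < t
  · rw [if_pos h, if_neg (by omega)]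
  · rw [if_neg h, if_pos (by omega)]

lemma getComb_eq (n r : Int) (hr : 0 ≤ r) : getComb n r = binom n r := by
  unfold getComb binom
  by_cases h : r ≤ n
  · have hle : r.toNat ≤ n.toNat := by omega
    have h2 : (n - r).toNat = n.toNat - r.toNat := by omega
    rw [if_pos h, if_pos ⟨hr, h⟩, h2, Nat.choose_eq_factorial_div_factorial hle]
  · rw [if_neg h, if_neg (by omega)]

lemma binom_pascal (m t : Int) (ht : 0 ≤ t) :
    binom (m + 1) (t + 1) = binom m t + binom m (t + 1) := by
  unfold binom
  by_cases h : t ≤ m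
  · have e1 : (m + 1).toNat = m.toNat + 1 := by omega
    have e2 : (t + 1).toNat = t.toNat + 1 := by omega
    rw [if_pos ⟨by omega, by omega⟩, if_pos ⟨ht, h⟩, e1, e2, Nat.choose_succ_succ]
    by_cases h2 : t + 1 ≤ m
    · rw [if_pos ⟨by omega, h2⟩]; push_cast; ring
    · have hmt : m = t := by omega
      rw [if_neg (by omega)]
      have : m.toNat.choose (t.toNat + 1) = 0 :=
        Nat.choose_eq_zero_of_lt (by omega)
      rw [this]; simp
  · rw [if_neg (by omega), if_neg (by omega), if_neg (by omega)]; simp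

-- Pascal in the form both loops use: the count of combinations whose current element is c.
lemma binom_step (n c t : Int) (ht : 1 ≤ t) :
    binom (n - (c - 1)) t = binom (n - c) (t - 1) + binom (n - c) t := by
  have h := binom_pascal (n - c) (t - 1) (by omega)
  have e1 : n - (c - 1) = n - c + 1 := by ring
  have e2 : t - 1 + 1 = t := by ring
  rw [e2] at h
  rw [e1, h]

lemma binom_le_succ (m t : Int) (ht : 1 ≤ t) : binom m t ≤ binom (m + 1) t := by
  have h := binom_pascal m (t - 1) (by omega)
  have h2 := binom_nonneg m (t - 1)
  rw [show t - 1 + 1 = t by ring] at h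
  omega

lemma binom_antitone (n t c c' : Int) (ht : 1 ≤ t) (h : c ≤ c') :
    binom (n - c') t ≤ binom (n - c) t := by
  obtain ⟨d, hd⟩ : ∃ d : Nat, c' = c + (d : Int) := ⟨(c' - c).toNat, by omega⟩
  subst hd
  induction d with
  | zero => simp
  | succ d ih =>
    have h1 := binom_le_succ (n - (c + (d : Int)) - 1) t ht
    have e : n - (c + (d : Int)) - 1 + 1 = n - (c + (d : Int)) := by ring
    rw [e] at h1
    have e2 : n - (c + ((d + 1 : Nat) : Int)) = n - (c + (d : Int)) - 1 := by push_cast; ring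
    rw [e2]
    exact le_trans h1 (ih (by omega))

-- A's inner loop walks to the least c ≥ j+1 with r0 ≤ C(n-j,t) - C(n-c,t)  (t = k-s+1).
lemma innerA_least (n k s r0 j cstar : Int) (hks : 0 ≤ k - s)
    (hlo : j + 1 ≤ cstar)
    (hleast : ∀ c, j + 1 ≤ c → c < cstar →
      ¬ (r0 ≤ binom (n - j) (k - s + 1) - binom (n - c) (k - s + 1)))
    (hP : r0 ≤ binom (n - j) (k - s + 1) - binom (n - cstar) (k - s + 1)) :
    ∀ (f : Nat) (cs : Int), j + 1 ≤ cs → cs ≤ cstar → (cstar - cs).toNat < f →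
      innerA f n k s (r0 - (binom (n - j) (k - s + 1) - binom (n - (cs - 1)) (k - s + 1))) cs
        = (r0 - (binom (n - j) (k - s + 1) - binom (n - (cstar - 1)) (k - s + 1)), cstar) := by
  intro f
  induction f with
  | zero => intro cs _ _ h; omega
  | succ f ih =>
    intro cs h1 h2 h3
    have ht : 1 ≤ k - s + 1 := by omega
    have hstep := binom_step n cs (k - s + 1) ht
    have e : k - s + 1 - 1 = k - s := by ring
    rw [e] at hstep
    simp only [innerA]
    rw [getComb_eq _ _ hks]
    by_cases hcs : cs = cstar
    · subst hcs
      rw [if_pos (by omega)]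
    · have hlt : cs < cstar := by omega
      have hnP := hleast cs h1 hlt
      rw [if_neg (by omega)]
      have e2 : r0 - (binom (n - j) (k - s + 1) - binom (n - (cs - 1)) (k - s + 1))
          - binom (n - cs) (k - s)
          = r0 - (binom (n - j) (k - s + 1) - binom (n - (cs + 1 - 1)) (k - s + 1)) := by
        have e3 : cs + 1 - 1 = cs := by ring
        rw [e3]; omega
      rw [e2]
      exact ih (cs + 1) (by omega) (by omega) (by omega)

-- B's binary search finds the same least c.
lemma bsearch_least (r0 total n t cstar : Int) (ht : 1 ≤ t)
    (hP : r0 ≤ total - binom (n - cstar) t) :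
    ∀ (f : Nat) (lo hi : Int), lo ≤ cstar → cstar ≤ hi →
      (∀ c, lo ≤ c → c < cstar → ¬ (r0 ≤ total - binom (n - c) t)) →
      (hi - lo).toNat < f →
      bsearchB f r0 total n t lo hi = cstar := by
  intro f
  induction f with
  | zero => intro lo hi h1 h2 _ h4; omega
  | succ f ih =>
    intro lo hi h1 h2 hleast h4
    simp only [bsearchB]
    by_cases hlh : lo < hi
    · rw [if_pos hlh]
      have hmid1 : lo ≤ PySem.Int.floordiv (lo + hi) 2 := by
        rw [PySem.Int.le_floordiv_iff_mul_le (by omega)]; omega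
      have hmid2 : PySem.Int.floordiv (lo + hi) 2 < hi := by
        rw [PySem.Int.floordiv_lt_iff_lt_mul (by omega)]; omega
      set mid := PySem.Int.floordiv (lo + hi) 2 with hmiddef
      rw [combB_eq]
      by_cases hc : r0 ≤ total - binom (n - mid) t
      · rw [if_pos hc]
        have hcm : cstar ≤ mid := by
          by_contra h'
          exact hleast mid hmid1 (by omega) hc
        exact ih lo mid h1 hcm (fun c hcℓ hcu => hleast c hcℓ hcu) (by omega)
      · rw [if_neg hc]
        have hcm : mid < cstar := by
          by_contra h'
          have := binom_antitone n t cstar mid ht (by omega)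
          omega
        exact ih (mid + 1) hi (by omega) h2
          (fun c hcℓ hcu => hleast c (by omega) hcu) (by omega)
    · rw [if_neg hlh]; omega

-- Outer loops in lockstep: slot u of B (t = u) is slot s = k-u+1 of A.
lemma outer_eq (n k : Int) :
    ∀ (u : Nat) (r j : Int) (res : List Int),
      0 ≤ j → r ≤ binom (n - j) (u : Int) →
      outerA u n k (k - (u : Int) + 1) r j res = outerB u n (u : Int) r j res := by
  intro u
  induction u with
  | zero => intro r j res _ _; rfl
  | succ u ih =>
    intro r j res hj hr
    have hucast : ((u + 1 : Nat) : Int) = (u : Int) + 1 := by push_cast; ring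
    rw [hucast]
    set t : Int := (u : Int) + 1 with htdef
    have ht1 : 1 ≤ t := by omega
    set s : Int := k - t + 1 with hsdef
    have hks0 : 0 ≤ k - s := by omega
    have hT : k - s + 1 = t := by omega
    have hr' : r ≤ binom (n - j) t := hr
    set lo : Int := j + 1 with hlodef
    set hi : Int := if n - t + 1 < lo then lo else n - t + 1 with hhidef
    have hlohi : lo ≤ hi := by rw [hhidef]; split <;> omega
    have hPhi : r ≤ binom (n - j) t - binom (n - hi) t := by
      rw [hhidef]
      by_cases hcase : n - t + 1 < lo
      · rw [if_pos hcase]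
        have h1 : binom (n - j) t = 0 := by unfold binom; rw [if_neg (by omega)]
        have h2 : binom (n - lo) t = 0 := by unfold binom; rw [if_neg (by omega)]
        omega
      · rw [if_neg hcase]
        have h2 : binom (n - (n - t + 1)) t = 0 := by
          unfold binom; rw [if_neg (by omega)]
        omega
    have hex : ∃ d : Nat, r ≤ binom (n - j) t - binom (n - (lo + (d : Int))) t := by
      refine ⟨(hi - lo).toNat, ?_⟩
      rw [show lo + (((hi - lo).toNat : Nat) : Int) = hi by omega]; exact hPhi
    set cstar : Int := lo + ((Nat.find hex : Nat) : Int) with hcdef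
    have hPc : r ≤ binom (n - j) t - binom (n - cstar) t := Nat.find_spec hex
    have hcl : lo ≤ cstar := by rw [hcdef]; omega
    have hch : cstar ≤ hi := by
      have hPhi' : r ≤ binom (n - j) t - binom (n - (lo + (((hi - lo).toNat : Nat) : Int))) t := by
        rw [show lo + (((hi - lo).toNat : Nat) : Int) = hi by omega]; exact hPhi
      have := Nat.find_min' hex hPhi'
      omega
    have hleast : ∀ c, lo ≤ c → c < cstar → ¬ (r ≤ binom (n - j) t - binom (n - c) t) := by
      intro c hc1 hc2 hcP
      have hcP' : r ≤ binom (n - j) t - binom (n - (lo + (((c - lo).toNat : Nat) : Int))) t := by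
        rw [show lo + (((c - lo).toNat : Nat) : Int) = c by omega]; exact hcP
      exact Nat.find_min hex (m := (c - lo).toNat) (by omega) hcP'
    -- A's inner loop lands on cstar
    have hfuelA : (cstar - lo).toNat < n.toNat + 2 := by
      by_cases hcase : n - t + 1 < lo
      · have : hi = lo := by rw [hhidef, if_pos hcase]
        omega
      · have : hi = n - t + 1 := by rw [hhidef, if_neg hcase]
        omega
    have hA := innerA_least n k s r j cstar hks0 (by omega)
      (by rw [hT]; exact hleast) (by rw [hT]; exact hPc)
      (n.toNat + 2) lo (by omega) hcl hfuelA
    rw [hT] at hA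
    rw [show (lo - 1 : Int) = j by omega] at hA
    rw [sub_self, sub_zero] at hA
    -- B's binary search lands on cstar
    have hB := bsearch_least r (binom (n - j) t) n t cstar ht1 hPc
      ((hi - lo).toNat + 1) lo hi hcl hch hleast (by omega)
    -- one step of each loop
    simp only [outerA, outerB]
    rw [combB_eq, hB, hA]
    have hrB : r - (binom (n - j) t - combB (n - cstar + 1) t)
        = r - (binom (n - j) t - binom (n - (cstar - 1)) t) := by
      rw [combB_eq, show (n - cstar + 1 : Int) = n - (cstar - 1) by ring]
    rw [hrB]
    have hnext : r - (binom (n - j) t - binom (n - (cstar - 1)) t)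
        ≤ binom (n - cstar) (u : Int) := by
      have hstep := binom_step n cstar t ht1
      have hnn := binom_nonneg (n - cstar) t
      have e : (t - 1 : Int) = (u : Int) := by omega
      rw [e] at hstep
      omega
    have hs1 : s + 1 = k - (u : Int) + 1 := by omega
    have htm1 : t - 1 = (u : Int) := by omega
    rw [hs1, htm1]
    exact ih (r - (binom (n - j) t - binom (n - (cstar - 1)) t)) cstar (res ++ [cstar])
      (by omega) hnext

-- ===== VERDICT (by name: the statement is the Claim_ definition above) =====
theorem get_set_spec : Claim_equal_get_set := by
  intro i n k _ hpre
  unfold Spec_get_set get_set get_set_alt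
  by_cases hk : k ≤ 0
  · have h0 : k.toNat = 0 := by omega
    rw [h0]; rfl
  · have hpre' : i ≤ binom n k := by
      rcases hpre with h | h
      · omega
      · exact h
    have hkk : ((k.toNat : Nat) : Int) = k := by omega
    have := outer_eq n k k.toNat i 0 [] (by omega) (by rw [hkk]; simpa using hpre')
    rw [hkk] at this
    rw [show k - k + 1 = (1 : Int) by ring] at this
    exact this
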